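-- pv_equiv track=rewrite | github.com/Yoriyari/MUSA02 | cogs/roll.py | index_operators
-- ===== SOURCE A (Python) =====
-- def index_operators(expr, active_parentheses):
--     i_add, i_min, i_mul, i_div = -1, -1, -1, -1
--     for i in range(len(expr)):
--         if any([i >= p[0] and i <= p[1] for p in active_parentheses]):
--             continue
--         if i_add == -1 and expr[i] == "+":
--             i_add = i
--         if i_min == -1 and expr[i] == "-":
--             i_min = i
--         if i_mul == -1 and expr[i] == "*":
--             i_mul = i
--         if i_div == -1 and expr[i] == "/":
--             i_div = i
--     return i_add, i_min, i_mul, i_div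
-- ===== SOURCE B (Python) =====
-- def index_operators(expr, active_parentheses):
--     def first(ch):
--         for i, c in enumerate(expr):
--             if c == ch and not any(a <= i <= b for a, b in active_parentheses):
--                 return i
--         return -1
--     return first("+"), first("-"), first("*"), first("/")
-- ===== Notes on version B (the rewrite author's own statement) =====
-- stated objective: faster
-- what changed: B replaces A's single full scan that tests every index against every parenthesis interval and threads four -1-sentinel accumulators with four independent early-returning searches, one per operator, that test the intervals only at matching characters.
import Mathlib
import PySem

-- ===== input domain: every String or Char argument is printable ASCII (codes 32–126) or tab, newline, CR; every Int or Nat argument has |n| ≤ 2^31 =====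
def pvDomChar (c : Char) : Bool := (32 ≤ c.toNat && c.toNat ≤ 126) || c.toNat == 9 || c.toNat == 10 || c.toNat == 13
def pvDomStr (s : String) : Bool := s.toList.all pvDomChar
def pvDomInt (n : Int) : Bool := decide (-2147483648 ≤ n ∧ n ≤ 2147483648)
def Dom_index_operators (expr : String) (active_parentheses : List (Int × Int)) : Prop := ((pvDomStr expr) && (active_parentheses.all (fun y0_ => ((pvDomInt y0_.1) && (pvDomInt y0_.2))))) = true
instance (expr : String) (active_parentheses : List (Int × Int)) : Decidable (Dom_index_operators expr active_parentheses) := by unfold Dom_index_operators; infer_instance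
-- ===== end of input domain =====

-- B replaces A's single scan threading four sentinel accumulators by four independent
-- early-returning searches, one per operator; same results, alternative decomposition.

-- ===== PORT A =====
-- any([i >= p[0] and i <= p[1] for p in active_parentheses])
def pvCovA (aps : List (Int × Int)) (i : Int) : Bool :=
  aps.any (fun p => decide (i ≥ p.1) && decide (i ≤ p.2))

def index_operators (expr : String) (active_parentheses : List (Int × Int)) : Int × Int × Int × Int :=
  (List.range expr.toList.length).foldl
    (fun (s : Int × Int × Int × Int) (i : Nat) =>
      if pvCovA active_parentheses (i : Int) then s
      else
        let a := if s.1 == -1 && expr.toList.getD i ' ' == '+' then (i : Int) else s.1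
        let m := if s.2.1 == -1 && expr.toList.getD i ' ' == '-' then (i : Int) else s.2.1
        let u := if s.2.2.1 == -1 && expr.toList.getD i ' ' == '*' then (i : Int) else s.2.2.1
        let d := if s.2.2.2 == -1 && expr.toList.getD i ' ' == '/' then (i : Int) else s.2.2.2
        (a, m, u, d))
    (-1, -1, -1, -1)

-- ===== PORT B =====
-- any(a <= i <= b for a, b in active_parentheses)
def pvCovB (aps : List (Int × Int)) (i : Int) : Bool :=
  aps.any (fun p => decide (p.1 ≤ i) && decide (i ≤ p.2))

-- the inner 'for i, c in enumerate(expr): …return i…' loop of B's helper 'first'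
def pvFirstOp (aps : List (Int × Int)) (ch : Char) : List Char → Nat → Int
  | [], _ => -1
  | c :: rest, i =>
      if c == ch && !pvCovB aps (i : Int) then (i : Int)
      else pvFirstOp aps ch rest (i + 1)

def index_operators_alt (expr : String) (active_parentheses : List (Int × Int)) : Int × Int × Int × Int :=
  (pvFirstOp active_parentheses '+' expr.toList 0, pvFirstOp active_parentheses '-' expr.toList 0,
   pvFirstOp active_parentheses '*' expr.toList 0, pvFirstOp active_parentheses '/' expr.toList 0)

-- ===== PRECONDITION & SPEC =====
def Spec_index_operators (expr : String) (active_parentheses : List (Int × Int)) (out : Int × Int × Int × Int) : Prop := out = index_operators_alt expr active_parentheses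
instance (expr : String) (active_parentheses : List (Int × Int)) (out : Int × Int × Int × Int) : Decidable (Spec_index_operators expr active_parentheses out) := by unfold Spec_index_operators; infer_instance

-- ===== CLAIM (what is proved, stated in full; the proofs are below) =====
def Claim_equal_index_operators : Prop := ∀ (expr : String) (active_parentheses : List (Int × Int)), Dom_index_operators expr active_parentheses → Spec_index_operators expr active_parentheses (index_operators expr active_parentheses)

-- ===== LEMMAS AND PROOFS =====

-- proof-only helper: A's loop written structurally over the character list
def pvLoopA (aps : List (Int × Int)) : List Char → Nat → Int × Int × Int × Int → Int × Int × Int × Int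
  | [], _, s => s
  | c :: rest, i, s =>
      if pvCovA aps (i : Int) then pvLoopA aps rest (i + 1) s
      else
        pvLoopA aps rest (i + 1)
          (if s.1 == -1 && c == '+' then (i : Int) else s.1,
           if s.2.1 == -1 && c == '-' then (i : Int) else s.2.1,
           if s.2.2.1 == -1 && c == '*' then (i : Int) else s.2.2.1,
           if s.2.2.2 == -1 && c == '/' then (i : Int) else s.2.2.2)

lemma pvFoldA_eq_loop (aps : List (Int × Int)) (cs pre : List Char)
    (s : Int × Int × Int × Int) :
    (List.range' pre.length cs.length).foldl
      (fun (s : Int × Int × Int × Int) (i : Nat) =>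
        if pvCovA aps (i : Int) then s
        else
          ((if s.1 == -1 && (pre ++ cs).getD i ' ' == '+' then (i : Int) else s.1),
           (if s.2.1 == -1 && (pre ++ cs).getD i ' ' == '-' then (i : Int) else s.2.1),
           (if s.2.2.1 == -1 && (pre ++ cs).getD i ' ' == '*' then (i : Int) else s.2.2.1),
           (if s.2.2.2 == -1 && (pre ++ cs).getD i ' ' == '/' then (i : Int) else s.2.2.2))) s
    = pvLoopA aps cs pre.length s := by
  induction cs generalizing pre s with
  | nil => simp [pvLoopA]
  | cons c rest ih =>
    have hget : (pre ++ c :: rest).getD pre.length ' ' = c := by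
      simp [List.getD]
    have happ : pre ++ c :: rest = (pre ++ [c]) ++ rest := by simp
    have hlen : pre.length + 1 = (pre ++ [c]).length := by simp
    simp only [List.length_cons, List.range'_succ, List.foldl_cons, hget]
    rw [happ, hlen, ih (pre ++ [c])]
    by_cases hcv : pvCovA aps (pre.length : Int) = true <;>
      simp [pvLoopA, hcv]

lemma pvLoopA_eq_firstOps (aps : List (Int × Int)) (cs : List Char) (k : Nat)
    (a m u d : Int) :
    pvLoopA aps cs k (a, m, u, d) =
      ((if a = -1 then pvFirstOp aps '+' cs k else a),
       (if m = -1 then pvFirstOp aps '-' cs k else m),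
       (if u = -1 then pvFirstOp aps '*' cs k else u),
       (if d = -1 then pvFirstOp aps '/' cs k else d)) := by
  induction cs generalizing k a m u d with
  | nil => simp [pvLoopA, pvFirstOp]
  | cons c rest ih =>
    have hcov : pvCovA aps (k : Int) = pvCovB aps (k : Int) := by
      simp [pvCovA, pvCovB, ge_iff_le]
    by_cases h : pvCovA aps (k : Int) = true
    · have hB : pvCovB aps (k : Int) = true := by rw [← hcov]; exact h
      simp [pvLoopA, pvFirstOp, h, hB, ih]
    · have hB : pvCovB aps (k : Int) = false := by
        rw [← hcov]; exact Bool.not_eq_true _ ▸ (by simpa using h)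
      have hk : (k : Int) ≠ -1 := by omega
      simp only [pvLoopA, h, if_false, Bool.false_eq_true, ih, pvFirstOp, hB,
        Bool.not_false, Bool.and_true]
      congr 1
      · by_cases ha : a = -1 <;> by_cases hc : c = '+' <;>
          simp [ha, hc, hk]
      congr 1
      · by_cases ha : m = -1 <;> by_cases hc : c = '-' <;>
          simp [ha, hc, hk]
      congr 1
      · by_cases ha : u = -1 <;> by_cases hc : c = '*' <;>
          simp [ha, hc, hk]
      · by_cases ha : d = -1 <;> by_cases hc : c = '/' <;>
          simp [ha, hc, hk]

-- ===== VERDICT (by name: the statement is the Claim_ definition above) =====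
theorem index_operators_spec : Claim_equal_index_operators := by
  intro expr aps _
  show index_operators expr aps = index_operators_alt expr aps
  unfold index_operators index_operators_alt
  have h := pvFoldA_eq_loop aps expr.toList [] (-1, -1, -1, -1)
  simp only [List.nil_append, List.length_nil] at h
  rw [List.range_eq_range']
  exact h.trans (by rw [pvLoopA_eq_firstOps]; simp)
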